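-- pv_equiv track=rewrite | github.com/julia-majkowska/Rzeczy-na-uczelnie | tm/Z2/corrector3.py | letters_close
-- ===== SOURCE A (Python) =====
-- from collections import defaultdict as dd
--
-- keyboard = ['qwertyuiop[]', 'asdfghjkl;\'', '<zxcvbnm,./']
--
-- coords  = { keyboard[a][b] : (a, b) for a in range(len(keyboard)) for b in range(len(keyboard[a]))}
--
-- subst = dd(lambda: set())
--
-- def letters_close(l1, l2) :
--     l1 = l1.lower()
--     l2 = l2.lower()
--     if l1 == l2 :
--         return True
--     if l2 in subst[l1] :
--         return True
--     surround = [(-1, 0), (-1, 1), (0, -1), (0, 1), (1, -1) , (1, 0)]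
--     if not l1 in coords :
--         return False
--     i, j = coords[l1]
--     for (i1, j1) in surround :
--         i2 = i1+i
--         if i2 < 0 or i2 >= len(keyboard):
--             continue
--         j2 = j1+j
--         if j2 < 0 or j2 >= len(keyboard[i2]) :
--             continue
--         if keyboard[i2][j2] == l2:
--             return True
--     return False
-- ===== SOURCE B (Python) =====
-- keyboard = ['qwertyuiop[]', 'asdfghjkl;\'', '<zxcvbnm,./']
--
-- _OFFSETS = [(-1, 0), (-1, 1), (0, -1), (0, 1), (1, -1), (1, 0)]
--
-- # one-time precomputed adjacency table: char -> set of close chars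
-- adj = {}
-- for _i, _row in enumerate(keyboard):
--     for _j, _ch in enumerate(_row):
--         _s = adj.setdefault(_ch, set())
--         for _di, _dj in _OFFSETS:
--             _i2 = _i + _di
--             _j2 = _j + _dj
--             if 0 <= _i2 < len(keyboard) and 0 <= _j2 < len(keyboard[_i2]):
--                 _s.add(keyboard[_i2][_j2])
--
-- def letters_close(l1, l2):
--     l1 = l1.lower()
--     l2 = l2.lower()
--     return l1 == l2 or l2 in adj.get(l1, set())
-- ===== Notes on version B (the rewrite author's own statement) =====
-- stated objective: simpler
-- what changed: B precomputes once, at module load, an adjacency dict mapping each keyboard character to the set of its close characters, so letters_close becomes a one-line equality-or-membership test instead of A's per-call six-offset geometric scan with bounds checks (A's inert subst/coords-miss machinery disappears).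
import Mathlib
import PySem

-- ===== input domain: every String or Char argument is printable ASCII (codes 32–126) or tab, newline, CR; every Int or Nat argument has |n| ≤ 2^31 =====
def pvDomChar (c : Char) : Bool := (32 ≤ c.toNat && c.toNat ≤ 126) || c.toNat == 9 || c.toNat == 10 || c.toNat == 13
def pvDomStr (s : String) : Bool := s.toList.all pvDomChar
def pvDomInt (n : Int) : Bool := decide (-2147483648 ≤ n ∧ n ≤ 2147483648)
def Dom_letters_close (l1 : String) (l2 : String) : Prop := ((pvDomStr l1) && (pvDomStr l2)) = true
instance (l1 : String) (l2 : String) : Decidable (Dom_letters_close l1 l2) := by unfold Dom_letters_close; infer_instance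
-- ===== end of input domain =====

-- B replaces A's per-call geometric scan over six keyboard offsets by a one-time
-- precomputed adjacency table with a constant-time membership lookup (objective: simpler).

-- ===== PORT A =====
def pvKeyboard : List String := ["qwertyuiop[]", "asdfghjkl;'", "<zxcvbnm,./"]

-- coords = {keyboard[a][b] : (a,b) for a in range(len(keyboard)) for b in range(len(keyboard[a]))}
-- (the inner 'none' branches are unreachable: both indices come from range over the lengths)
def pvCoords : PySem.Dict String (Int × Int) :=
  (PySem.List.pyRange 0 (pvKeyboard.length : Int) 1).foldl (fun d a =>
    match PySem.List.pyGet? pvKeyboard a with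
    | none => d
    | some row =>
      (PySem.List.pyRange 0 (PySem.Str.len row) 1).foldl (fun d b =>
        match PySem.Str.pyGet? row b with
        | none => d
        | some c => d.insert (String.singleton c) (a, b)) d) PySem.Dict.empty

-- subst = defaultdict(lambda: set()): never written to, so every lookup yields the empty set
-- (A's 'subst[l1]' also inserts the key into subst — a mutation of module state that can
-- never change any return value, since all stored sets stay empty; not modelled)
def pvSubst : PySem.Dict String (PySem.Set String) := PySem.Dict.empty

-- the 'for (i1, j1) in surround' loop with its early 'return True'
def pvLoopA : List (Int × Int) → Int → Int → String → Bool
  | [], _, _, _ => false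
  | (i1, j1) :: rest, i, j, b =>
    let i2 := i1 + i
    if i2 < 0 ∨ i2 ≥ (pvKeyboard.length : Int) then pvLoopA rest i j b
    else
      match PySem.List.pyGet? pvKeyboard i2 with
      | none => pvLoopA rest i j b    -- unreachable: i2 bounds just checked
      | some row =>
        let j2 := j1 + j
        if j2 < 0 ∨ j2 ≥ PySem.Str.len row then pvLoopA rest i j b
        else
          match PySem.Str.pyGet? row j2 with
          | none => pvLoopA rest i j b    -- unreachable: j2 bounds just checked
          | some c => if String.singleton c == b then true else pvLoopA rest i j b

def letters_close (l1 : String) (l2 : String) : Bool :=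
  let a := PySem.Str.lower l1
  let b := PySem.Str.lower l2
  if a == b then true
  else if PySem.Set.contains (PySem.Dict.getD pvSubst a PySem.Set.empty) b then true
  else
    let surround : List (Int × Int) := [(-1, 0), (-1, 1), (0, -1), (0, 1), (1, -1), (1, 0)]
    if !(PySem.Dict.contains pvCoords a) then false
    else
      match PySem.Dict.get? pvCoords a with
      | none => false    -- unreachable: membership just checked
      | some (i, j) => pvLoopA surround i j b

-- ===== PORT B =====
def pvOffsets : List (Int × Int) := [(-1, 0), (-1, 1), (0, -1), (0, 1), (1, -1), (1, 0)]

-- adj: precomputed at module load by iterating all positions and applying the six offsets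
def pvAdj : PySem.Dict String (PySem.Set String) :=
  (PySem.List.enumerate pvKeyboard).foldl (fun d p =>
    let i := p.1
    let row := p.2
    (PySem.List.enumerate row.toList).foldl (fun d q =>
      let j := q.1
      let ch := String.singleton q.2
      let s := d.getD ch PySem.Set.empty     -- adj.setdefault(ch, set())
      let s := pvOffsets.foldl (fun s o =>
        let i2 := i + o.1
        let j2 := j + o.2
        if 0 ≤ i2 ∧ i2 < (pvKeyboard.length : Int) then
          match PySem.List.pyGet? pvKeyboard i2 with
          | none => s    -- unreachable: i2 bounds just checked
          | some row2 =>
            if 0 ≤ j2 ∧ j2 < PySem.Str.len row2 then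
              match PySem.Str.pyGet? row2 j2 with
              | none => s    -- unreachable: j2 bounds just checked
              | some c => PySem.Set.add s (String.singleton c)
            else s
        else s) s
      d.insert ch s) d) PySem.Dict.empty

def letters_close_alt (l1 : String) (l2 : String) : Bool :=
  let a := PySem.Str.lower l1
  let b := PySem.Str.lower l2
  a == b || PySem.Set.contains (PySem.Dict.getD pvAdj a PySem.Set.empty) b

-- ===== PRECONDITION & SPEC =====
def Spec_letters_close (l1 : String) (l2 : String) (out : Bool) : Prop := out = letters_close_alt l1 l2
instance (l1 : String) (l2 : String) (out : Bool) : Decidable (Spec_letters_close l1 l2 out) := by unfold Spec_letters_close; infer_instance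

-- ===== CLAIM (what is proved, stated in full; the proofs are below) =====
def Claim_equal_letters_close : Prop := ∀ (l1 : String) (l2 : String), Dom_letters_close l1 l2 → Spec_letters_close l1 l2 (letters_close l1 l2)

-- ===== LEMMAS AND PROOFS =====

-- the list of neighbour characters A's scan compares l2 against, in scan order
def pvNeigh : List (Int × Int) → Int → Int → List String
  | [], _, _ => []
  | (i1, j1) :: rest, i, j =>
    let i2 := i1 + i
    if i2 < 0 ∨ i2 ≥ (pvKeyboard.length : Int) then pvNeigh rest i j
    else
      match PySem.List.pyGet? pvKeyboard i2 with
      | none => pvNeigh rest i j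
      | some row =>
        let j2 := j1 + j
        if j2 < 0 ∨ j2 ≥ PySem.Str.len row then pvNeigh rest i j
        else
          match PySem.Str.pyGet? row j2 with
          | none => pvNeigh rest i j
          | some c => String.singleton c :: pvNeigh rest i j

-- A's early-return scan is membership in its own neighbour list
theorem pvLoopA_eq_contains (offs : List (Int × Int)) (i j : Int) (b : String) :
    pvLoopA offs i j b = (pvNeigh offs i j).contains b := by
  induction offs with
  | nil => rfl
  | cons o rest ih =>
    obtain ⟨i1, j1⟩ := o
    by_cases h1 : (i1 + i < 0 ∨ i1 + i ≥ (pvKeyboard.length : Int))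
    · simp only [pvLoopA, pvNeigh, if_pos h1]; exact ih
    · cases h : PySem.List.pyGet? pvKeyboard (i1 + i) with
      | none => simp only [pvLoopA, pvNeigh, if_neg h1, h]; exact ih
      | some row =>
        by_cases h2 : (j1 + j < 0 ∨ j1 + j ≥ PySem.Str.len row)
        · simp only [pvLoopA, pvNeigh, if_neg h1, h, if_pos h2]; exact ih
        · cases h3 : PySem.Str.pyGet? row (j1 + j) with
          | none => simp only [pvLoopA, pvNeigh, if_neg h1, h, if_neg h2, h3]; exact ih
          | some c =>
            simp only [pvLoopA, pvNeigh, if_neg h1, h, if_neg h2, h3, List.contains_cons]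
            by_cases hc : String.singleton c = b
            · simp [hc]
            · simp [hc, Ne.symm hc, ih]

-- B's precomputed table agrees, key by key, with A's scan-time neighbour list.
-- pvTable pairs each keyboard key with (its adjacency set, its coordinates).
def pvTable : List (String × PySem.Set String × (Int × Int)) :=
  [("q", ["w", "a"], (0, 0)), ("w", ["q", "e", "a", "s"], (0, 1)), ("e", ["w", "r", "s", "d"], (0, 2)),
   ("r", ["e", "t", "d", "f"], (0, 3)), ("t", ["r", "y", "f", "g"], (0, 4)), ("y", ["t", "u", "g", "h"], (0, 5)),
   ("u", ["y", "i", "h", "j"], (0, 6)), ("i", ["u", "o", "j", "k"], (0, 7)), ("o", ["i", "p", "k", "l"], (0, 8)),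
   ("p", ["o", "[", "l", ";"], (0, 9)), ("[", ["p", "]", ";", "'"], (0, 10)), ("]", ["[", "'"], (0, 11)),
   ("a", ["q", "w", "s", "<"], (1, 0)), ("s", ["w", "e", "a", "d", "<", "z"], (1, 1)),
   ("d", ["e", "r", "s", "f", "z", "x"], (1, 2)), ("f", ["r", "t", "d", "g", "x", "c"], (1, 3)),
   ("g", ["t", "y", "f", "h", "c", "v"], (1, 4)), ("h", ["y", "u", "g", "j", "v", "b"], (1, 5)),
   ("j", ["u", "i", "h", "k", "b", "n"], (1, 6)), ("k", ["i", "o", "j", "l", "n", "m"], (1, 7)),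
   ("l", ["o", "p", "k", ";", "m", ","], (1, 8)), (";", ["p", "[", "l", "'", ",", "."], (1, 9)),
   ("'", ["[", "]", ";", ".", "/"], (1, 10)), ("<", ["a", "s", "z"], (2, 0)), ("z", ["s", "d", "<", "x"], (2, 1)),
   ("x", ["d", "f", "z", "c"], (2, 2)), ("c", ["f", "g", "x", "v"], (2, 3)), ("v", ["g", "h", "c", "b"], (2, 4)),
   ("b", ["h", "j", "v", "n"], (2, 5)), ("n", ["j", "k", "b", "m"], (2, 6)), ("m", ["k", "l", "n", ","], (2, 7)),
   (",", ["l", ";", "m", "."], (2, 8)), (".", [";", "'", ",", "/"], (2, 9)), ("/", ["'", "."], (2, 10))]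

-- generic: looking up an aligned pair of dicts, where each stored set is that key's pvNeigh list
theorem pv_aligned (ps : List (String × PySem.Set String × (Int × Int)))
    (hps : ∀ p ∈ ps, p.2.1 = pvNeigh [(-1, 0), (-1, 1), (0, -1), (0, 1), (1, -1), (1, 0)] p.2.2.1 p.2.2.2)
    (a : String) :
    PySem.Dict.getD (PySem.Dict.mk (ps.map fun p => (p.1, p.2.1))) a PySem.Set.empty =
      (match (PySem.Dict.mk (ps.map fun p => (p.1, p.2.2))).get? a with
       | none => []
       | some (i, j) => pvNeigh [(-1, 0), (-1, 1), (0, -1), (0, 1), (1, -1), (1, 0)] i j) := by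
  induction ps with
  | nil => rfl
  | cons p rest ih =>
    simp only [List.map_cons, PySem.Dict.getD, PySem.Dict.get?_mk_cons]
    by_cases h : (p.1 == a) = true
    · simp only [h, if_true, Option.getD_some]
      exact hps p (List.mem_cons_self ..)
    · simp only [h]
      exact ih (fun q hq => hps q (List.mem_cons_of_mem _ hq))

set_option maxHeartbeats 2000000 in
theorem pvAdj_getD (a : String) :
    PySem.Dict.getD pvAdj a PySem.Set.empty =
      (match PySem.Dict.get? pvCoords a with
       | none => []
       | some (i, j) => pvNeigh [(-1, 0), (-1, 1), (0, -1), (0, 1), (1, -1), (1, 0)] i j) := by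
  have hadj : pvAdj = PySem.Dict.mk (pvTable.map fun p => (p.1, p.2.1)) := by decide
  have hco : pvCoords = PySem.Dict.mk (pvTable.map fun p => (p.1, p.2.2)) := by decide
  rw [hadj, hco]
  exact pv_aligned pvTable (by decide) a

-- 'l1 in coords' in terms of the lookup that follows it
theorem pv_contains_eq_isSome (items : List (String × (Int × Int))) (a : String) :
    (PySem.Dict.mk items).contains a = ((PySem.Dict.mk items).get? a).isSome := by
  induction items with
  | nil => rfl
  | cons p rest ih =>
    obtain ⟨k, v⟩ := p
    simp only [PySem.Dict.contains, List.any_cons, PySem.Dict.get?_mk_cons]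
    by_cases h : (k == a) = true
    · simp [h]
    · simpa [h, PySem.Dict.contains] using ih

-- ===== VERDICT (by name: the statement is the Claim_ definition above) =====
theorem letters_close_spec : Claim_equal_letters_close := by
  intro l1 l2 _
  unfold Spec_letters_close letters_close letters_close_alt
  set a := PySem.Str.lower l1
  set b := PySem.Str.lower l2
  by_cases hab : (a == b) = true
  · simp [hab]
  · have hsub : PySem.Set.contains (PySem.Dict.getD pvSubst a PySem.Set.empty) b = false := rfl
    simp only [hab, if_false, hsub, Bool.false_eq_true, Bool.false_or]
    rw [pvAdj_getD]
    cases h : PySem.Dict.get? pvCoords a with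
    | none =>
      have hc : PySem.Dict.contains pvCoords a = false := by
        cases hd : pvCoords with
        | mk items => rw [pv_contains_eq_isSome, ← hd, h]; rfl
      simp [hc, PySem.Set.contains]
    | some ij =>
      obtain ⟨i, j⟩ := ij
      have hc : PySem.Dict.contains pvCoords a = true := by
        cases hd : pvCoords with
        | mk items => rw [pv_contains_eq_isSome, ← hd, h]; rfl
      simp [hc, PySem.Set.contains, pvLoopA_eq_contains]
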